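-- pv_equiv track=rewrite | github.com/Vikas-ai56/DSA-techniques | techniques1.py | numberOfFactor
-- ===== SOURCE A (Python) =====
-- def numberOfFactor(n):
--     if n in (0,1,2):
--         return 1
--     elif n == 3:
--         return 2
--     else:
--         sp1 = numberOfFactor(n-1)
--         sp2 = numberOfFactor(n-3)
--         sp3 = numberOfFactor(n-4)
--         return sp1 + sp2 + sp3
-- ===== SOURCE B (Python) =====
-- def numberOfFactor(n):
--     if n <= 2:
--         return 1
--     if n == 3:
--         return 2
--     a, b, c, d = 1, 1, 1, 2  # f(0), f(1), f(2), f(3)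
--     for _ in range(n - 3):
--         a, b, c, d = b, c, d, d + b + a
--     return d
-- ===== Notes on version B (the rewrite author's own statement) =====
-- stated objective: faster
-- what changed: Replaced the exponential three-way recursion by an iterative bottom-up recurrence keeping only the last four values.
import Mathlib
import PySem

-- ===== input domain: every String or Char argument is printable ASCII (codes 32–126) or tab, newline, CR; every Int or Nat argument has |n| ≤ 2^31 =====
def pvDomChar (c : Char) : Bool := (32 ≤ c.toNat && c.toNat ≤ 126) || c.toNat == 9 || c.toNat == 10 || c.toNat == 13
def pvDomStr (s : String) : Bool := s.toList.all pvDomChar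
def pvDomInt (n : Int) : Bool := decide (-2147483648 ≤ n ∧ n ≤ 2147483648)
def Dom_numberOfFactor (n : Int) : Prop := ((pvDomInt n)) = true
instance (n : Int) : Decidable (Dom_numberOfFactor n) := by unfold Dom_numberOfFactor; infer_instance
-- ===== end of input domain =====

-- ===== PORT A =====
-- B is an O(n) iterative recurrence replacing A's exponential three-way recursion.
-- A's recursion is lifted to Nat (Python A raises RecursionError on negative inputs; Pre_ excludes those).
def numberOfFactorAux : Nat → Int
  | 0 => 1
  | 1 => 1
  | 2 => 1
  | 3 => 2
  | (k+4) =>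
    let sp1 := numberOfFactorAux (k+3)
    let sp2 := numberOfFactorAux (k+1)
    let sp3 := numberOfFactorAux k
    sp1 + sp2 + sp3

def numberOfFactor (n : Int) : Int := numberOfFactorAux n.toNat

-- ===== PORT B =====
-- the loop of Source B: k remaining iterations, state (a,b,c,d)
def numberOfFactorLoop : Nat → Int × Int × Int × Int → Int
  | 0, (_, _, _, d) => d
  | (k+1), (a, b, c, d) => numberOfFactorLoop k (b, c, d, d + b + a)

def numberOfFactor_alt (n : Int) : Int :=
  if n ≤ 2 then 1
  else if n = 3 then 2
  else numberOfFactorLoop (n - 3).toNat (1, 1, 1, 2)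

-- ===== PRECONDITION & SPEC =====
-- Pre_ excludes negative inputs, on which Python A recurses past every base case and raises RecursionError.
def Pre_numberOfFactor (n : Int) : Prop := 0 ≤ n
instance (n : Int) : Decidable (Pre_numberOfFactor n) := by unfold Pre_numberOfFactor; infer_instance
def pvWitness_numberOfFactor : Int := 7

def Spec_numberOfFactor (n : Int) (out : Int) : Prop := out = numberOfFactor_alt n
instance (n : Int) (out : Int) : Decidable (Spec_numberOfFactor n out) := by unfold Spec_numberOfFactor; infer_instance

-- ===== CLAIM (what is proved, stated in full; the proofs are below) =====
def Claim_equal_numberOfFactor : Prop := ∀ (n : Int), Dom_numberOfFactor n → Pre_numberOfFactor n → Spec_numberOfFactor n (numberOfFactor n)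

-- ===== LEMMAS AND PROOFS =====
theorem aux_step (k : Nat) :
    numberOfFactorAux (k+4) = numberOfFactorAux (k+3) + numberOfFactorAux (k+1) + numberOfFactorAux k := by
  rfl

-- loop invariant: the state is four consecutive values of the recurrence
theorem loop_inv (k m : Nat) :
    numberOfFactorLoop k (numberOfFactorAux m, numberOfFactorAux (m+1),
      numberOfFactorAux (m+2), numberOfFactorAux (m+3)) = numberOfFactorAux (m+3+k) := by
  induction k generalizing m with
  | zero => rfl
  | succ k ih =>
    have h : numberOfFactorAux (m+3) + numberOfFactorAux (m+1) + numberOfFactorAux m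
        = numberOfFactorAux (m+4) := (aux_step m).symm
    calc numberOfFactorLoop (k+1) (numberOfFactorAux m, numberOfFactorAux (m+1),
          numberOfFactorAux (m+2), numberOfFactorAux (m+3))
        = numberOfFactorLoop k (numberOfFactorAux (m+1), numberOfFactorAux (m+2),
          numberOfFactorAux (m+3), numberOfFactorAux (m+4)) := by
          simp [numberOfFactorLoop, h]
      _ = numberOfFactorAux ((m+1)+3+k) := ih (m+1)
      _ = numberOfFactorAux (m+3+(k+1)) := by ring_nf

-- ===== VERDICT (by name: the statement is the Claim_ definition above) =====
theorem numberOfFactor_spec : Claim_equal_numberOfFactor := by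
  intro n _ hpre
  unfold Spec_numberOfFactor numberOfFactor numberOfFactor_alt
  by_cases h2 : n ≤ 2
  · have : n.toNat = 0 ∨ n.toNat = 1 ∨ n.toNat = 2 := by omega
    rcases this with h | h | h <;> simp [h2, h, numberOfFactorAux]
  · by_cases h3 : n = 3
    · simp [h3]; rfl
    · have hk : n.toNat = 3 + (n - 3).toNat := by omega
      have := loop_inv (n - 3).toNat 0
      simp only [numberOfFactorAux] at this
      simp [h2, h3, hk, this, Nat.add_comm]
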